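-- pv_equiv track=rewrite | github.com/supertester-ai/supertester | scripts/session-catchup.py | extract_phase_statuses
-- ===== SOURCE A (Python) =====
-- def extract_phase_statuses(test_plan: str) -> list:
--     """Extract all phase statuses."""
--     statuses = []
--     current_phase = ""
--     for line in test_plan.split("\n"):
--         if line.startswith("### Phase"):
--             current_phase = line.strip("# ").strip()
--         if "**Status:**" in line:
--             status = line.split("**Status:**")[1].strip()
--             statuses.append({"phase": current_phase, "status": status})
--     return statuses
-- ===== SOURCE B (Python) =====
-- def extract_phase_statuses(test_plan: str) -> list:
--     """Extract all phase statuses (two-pass: index the headers, then resolve each status)."""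
--     lines = test_plan.split("\n")
--     headers = [(i, line.strip("# ").strip())
--                for i, line in enumerate(lines)
--                if line.startswith("### Phase")]
--     result = []
--     for i, line in enumerate(lines):
--         if "**Status:**" in line:
--             phase = ""
--             for j, name in headers:
--                 if j <= i:
--                     phase = name
--             result.append({"phase": phase,
--                            "status": line.split("**Status:**")[1].strip()})
--     return result
-- ===== Notes on version B (the rewrite author's own statement) =====
-- stated objective: alternative
-- what changed: Replaces A's single stateful scan (carrying the current phase through the loop) by a two-pass decomposition: first index all phase-header lines with their line numbers, then map each status line to the last header at or before it.
import Mathlib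
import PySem

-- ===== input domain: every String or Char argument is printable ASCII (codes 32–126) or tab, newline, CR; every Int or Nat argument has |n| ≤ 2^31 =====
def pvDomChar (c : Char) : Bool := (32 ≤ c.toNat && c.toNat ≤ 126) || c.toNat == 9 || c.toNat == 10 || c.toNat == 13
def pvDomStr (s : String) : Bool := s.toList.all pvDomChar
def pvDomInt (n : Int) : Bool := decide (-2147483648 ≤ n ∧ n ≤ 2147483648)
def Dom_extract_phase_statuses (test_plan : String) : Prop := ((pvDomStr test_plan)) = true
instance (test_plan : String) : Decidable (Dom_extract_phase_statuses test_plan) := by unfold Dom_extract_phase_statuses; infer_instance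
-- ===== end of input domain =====

-- B replaces A's stateful single scan by a two-pass decomposition (index the headers, then
-- resolve each status line against the last header at or before it); objective: alternative.

-- ===== PORT A =====
-- A's loop body: state = (statuses, current_phase); the Python list index [1] is guarded by
-- the substring membership test, so the `.getD ""` default is never taken.
def epsStepA (st : List (List (String × String)) × String) (line : String) :
    List (List (String × String)) × String :=
  let cur := if PySem.Str.startswith line "### Phase"
             then PySem.Str.strip (PySem.Str.stripChars line "# ") else st.2
  if PySem.Str.isIn "**Status:**" line then
    (st.1 ++ [[("phase", cur),
               ("status", PySem.Str.strip (((PySem.Str.split? line "**Status:**").getD []).getD 1 ""))]],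
     cur)
  else (st.1, cur)

def extract_phase_statuses (test_plan : String) : List (List (String × String)) :=
  (((PySem.Str.split? test_plan "\n").getD []).foldl epsStepA ([], "")).1

-- ===== PORT B =====
def epsClean (line : String) : String := PySem.Str.strip (PySem.Str.stripChars line "# ")

def epsStatus (line : String) : String :=
  PySem.Str.strip (((PySem.Str.split? line "**Status:**").getD []).getD 1 "")

-- 'phase = ""; for j, name in headers: if j <= i: phase = name'
def epsPhaseAt (headers : List (Int × String)) (i : Int) : String :=
  headers.foldl (fun p h => if h.1 <= i then h.2 else p) ""

def extract_phase_statuses_alt (test_plan : String) : List (List (String × String)) :=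
  let lines := (PySem.Str.split? test_plan "\n").getD []
  let headers := ((PySem.List.enumerate lines).filter
      (fun p => PySem.Str.startswith p.2 "### Phase")).map (fun p => (p.1, epsClean p.2))
  ((PySem.List.enumerate lines).filter (fun p => PySem.Str.isIn "**Status:**" p.2)).map
    (fun p => [("phase", epsPhaseAt headers p.1), ("status", epsStatus p.2)])

-- ===== PRECONDITION & SPEC =====
def Spec_extract_phase_statuses (test_plan : String) (out : List (List (String × String))) : Prop := out = extract_phase_statuses_alt test_plan
instance (test_plan : String) (out : List (List (String × String))) : Decidable (Spec_extract_phase_statuses test_plan out) := by unfold Spec_extract_phase_statuses; infer_instance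

-- ===== CLAIM (what is proved, stated in full; the proofs are below) =====
def Claim_equal_extract_phase_statuses : Prop := ∀ (test_plan : String), Dom_extract_phase_statuses test_plan → Spec_extract_phase_statuses test_plan (extract_phase_statuses test_plan)

-- ===== LEMMAS AND PROOFS =====

-- the headers of the suffix of lines starting at line index n
def epsHdrs (ls : List String) (n : Int) : List (Int × String) :=
  ((PySem.List.enumerate ls n).filter
      (fun p => PySem.Str.startswith p.2 "### Phase")).map (fun p => (p.1, epsClean p.2))

lemma enumerate_cons {α : Type} (x : α) (t : List α) (n : Int) :
    PySem.List.enumerate (x :: t) n = (n, x) :: PySem.List.enumerate t (n + 1) := by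
  simp [PySem.List.enumerate]

lemma epsHdrs_cons (l : String) (t : List String) (n : Int) :
    epsHdrs (l :: t) n =
      (if PySem.Str.startswith l "### Phase" then [(n, epsClean l)] else []) ++ epsHdrs t (n + 1) := by
  unfold epsHdrs
  rw [enumerate_cons, List.filter_cons]
  by_cases hh : PySem.Str.startswith l "### Phase"
  · rw [if_pos (by exact hh), if_pos hh]; simp
  · rw [if_neg (by exact hh), if_neg hh]; simp

lemma mem_enumerate_le {α : Type} (ls : List α) : ∀ (n : Int) (q : Int × α),
    q ∈ PySem.List.enumerate ls n → n ≤ q.1 := by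
  induction ls with
  | nil => intro n q h; simp [PySem.List.enumerate] at h
  | cons x t ih =>
    intro n q h
    rw [enumerate_cons, List.mem_cons] at h
    rcases h with h | h
    · subst h; simp
    · have := ih (n + 1) q h; omega

lemma foldl_phase_of_gt (H : List (Int × String)) (s : String) (i : Int)
    (h : ∀ q ∈ H, i < q.1) :
    H.foldl (fun p h => if h.1 <= i then h.2 else p) s = s := by
  induction H generalizing s with
  | nil => rfl
  | cons q t ih =>
    have hq := h q (by simp)
    simp only [List.foldl_cons, if_neg (by omega : ¬ q.1 ≤ i)]
    exact ih s (fun r hr => h r (by simp [hr]))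

lemma epsPhaseAt_append_gt (H H' : List (Int × String)) (i : Int)
    (h : ∀ q ∈ H', i < q.1) : epsPhaseAt (H ++ H') i = epsPhaseAt H i := by
  unfold epsPhaseAt
  rw [List.foldl_append]
  exact foldl_phase_of_gt H' _ i h

lemma mem_epsHdrs_le (ls : List String) (n : Int) (q : Int × String)
    (h : q ∈ epsHdrs ls n) : n ≤ q.1 := by
  unfold epsHdrs at h
  simp only [List.mem_map, List.mem_filter] at h
  obtain ⟨p, ⟨hp, _⟩, he⟩ := h
  have := mem_enumerate_le ls n p hp
  subst he; exact this

lemma eps_loop_eq (ls : List String) : ∀ (n : Int) (Hpre : List (Int × String))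
    (p : String) (acc : List (List (String × String))),
    (∀ i : Int, n ≤ i → epsPhaseAt Hpre i = p) →
    (ls.foldl epsStepA (acc, p)).1
    = acc ++ ((PySem.List.enumerate ls n).filter (fun q => PySem.Str.isIn "**Status:**" q.2)).map
        (fun q => [("phase", epsPhaseAt (Hpre ++ epsHdrs ls n) q.1), ("status", epsStatus q.2)]) := by
  induction ls with
  | nil =>
    intro n Hpre p acc _
    simp [PySem.List.enumerate]
  | cons l t ih =>
    intro n Hpre p acc hp
    have htail : ∀ q ∈ epsHdrs t (n + 1), n < q.1 := by
      intro q hq; have := mem_epsHdrs_le t (n + 1) q hq; omega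
    rw [enumerate_cons, List.filter_cons, List.foldl_cons]
    by_cases hh : PySem.Str.startswith l "### Phase"
    · -- header line: the running phase becomes epsClean l
      have hH : Hpre ++ epsHdrs (l :: t) n = (Hpre ++ [(n, epsClean l)]) ++ epsHdrs t (n + 1) := by
        rw [epsHdrs_cons, if_pos hh, ← List.append_assoc]
      have hp' : ∀ i : Int, n + 1 ≤ i → epsPhaseAt (Hpre ++ [(n, epsClean l)]) i = epsClean l := by
        intro i hi
        unfold epsPhaseAt
        rw [List.foldl_append]
        simp [(by omega : n ≤ i)]
      have hcur : epsPhaseAt (Hpre ++ epsHdrs (l :: t) n) n = epsClean l := by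
        rw [hH, epsPhaseAt_append_gt _ _ _ htail]
        unfold epsPhaseAt
        rw [List.foldl_append]
        simp
      by_cases hs : PySem.Str.isIn "**Status:**" l
      · have hstep : epsStepA (acc, p) l
            = (acc ++ [[("phase", epsClean l), ("status", epsStatus l)]], epsClean l) := by
          have hhC : PySem.Chars.startswith l.toList ['#','#','#',' ','P','h','a','s','e'] = true := hh
          have hsC : PySem.Chars.isIn ['*','*','S','t','a','t','u','s',':','*','*'] l.toList = true := hs
          simp [epsStepA, epsClean, epsStatus, hhC, hsC]
        rw [hstep, ih (n + 1) (Hpre ++ [(n, epsClean l)]) (epsClean l) _ hp', ← hH,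
          if_pos (by exact hs), List.map_cons, hcur]
        simp [List.append_assoc, epsStatus]
      · have hstep : epsStepA (acc, p) l = (acc, epsClean l) := by
          have hhC : PySem.Chars.startswith l.toList ['#','#','#',' ','P','h','a','s','e'] = true := hh
          have hsC : PySem.Chars.isIn ['*','*','S','t','a','t','u','s',':','*','*'] l.toList = false := Bool.eq_false_iff.mpr hs
          simp [epsStepA, epsClean, hhC, hsC]
        rw [hstep, ih (n + 1) (Hpre ++ [(n, epsClean l)]) (epsClean l) _ hp', ← hH,
          if_neg (by exact hs)]
    · -- not a header line: the running phase stays p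
      have hH : Hpre ++ epsHdrs (l :: t) n = Hpre ++ epsHdrs t (n + 1) := by
        rw [epsHdrs_cons, if_neg hh]; simp
      have hp' : ∀ i : Int, n + 1 ≤ i → epsPhaseAt Hpre i = p := fun i hi => hp i (by omega)
      have hcur : epsPhaseAt (Hpre ++ epsHdrs (l :: t) n) n = p := by
        rw [hH, epsPhaseAt_append_gt _ _ _ htail]
        exact hp n le_rfl
      by_cases hs : PySem.Str.isIn "**Status:**" l
      · have hstep : epsStepA (acc, p) l
            = (acc ++ [[("phase", p), ("status", epsStatus l)]], p) := by
          have hhC : PySem.Chars.startswith l.toList ['#','#','#',' ','P','h','a','s','e'] = false := Bool.eq_false_iff.mpr hh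
          have hsC : PySem.Chars.isIn ['*','*','S','t','a','t','u','s',':','*','*'] l.toList = true := hs
          simp [epsStepA, epsStatus, hhC, hsC]
        rw [hstep, ih (n + 1) Hpre p _ hp', ← hH, if_pos (by exact hs), List.map_cons, hcur]
        simp [List.append_assoc, epsStatus]
      · have hstep : epsStepA (acc, p) l = (acc, p) := by
          have hhC : PySem.Chars.startswith l.toList ['#','#','#',' ','P','h','a','s','e'] = false := Bool.eq_false_iff.mpr hh
          have hsC : PySem.Chars.isIn ['*','*','S','t','a','t','u','s',':','*','*'] l.toList = false := Bool.eq_false_iff.mpr hs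
          simp [epsStepA, hhC, hsC]
        rw [hstep, ih (n + 1) Hpre p _ hp', ← hH, if_neg (by exact hs)]

-- ===== VERDICT (by name: the statement is the Claim_ definition above) =====
theorem extract_phase_statuses_spec : Claim_equal_extract_phase_statuses := by
  intro test_plan _
  unfold Spec_extract_phase_statuses extract_phase_statuses extract_phase_statuses_alt
  rw [eps_loop_eq ((PySem.Str.split? test_plan "\n").getD []) 0 [] "" []
      (fun i _ => rfl)]
  simp [epsHdrs]
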